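-- pv_equiv track=rewrite | github.com/wlkaqw/python | L074_X.py | func4
-- ===== SOURCE A (Python) =====
-- def func4(n):
--     if n not in range(1,1001):
--         return None
--     for i in range(1,1000):
--         sum1=0
--         for j in range(i,i+n+1):
--             sum1+=j**2
--         sum2=0
--         for k in range(i+n+1,i+2*n+1):
--             sum2+=k**2
--         if sum1==sum2:
--             return list(range(i,i+2*n+1))
--             break
--     else:
--         return None
-- ===== SOURCE B (Python) =====
-- def func4(n):
--     # closed form: the unique block start is i = 2*n*n + n (from (i+n)(i-(2n^2+n)) = 0)
--     if not (1 <= n <= 1000):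
--         return None
--     i = 2 * n * n + n
--     if i > 999:
--         return None
--     return list(range(i, i + 2 * n + 1))
-- ===== Notes on version B (the rewrite author's own statement) =====
-- stated objective: faster
-- what changed: Replaces the linear search with nested square-sum loops by the closed-form root i = 2n^2+n of the quadratic (i+n)(i-(2n^2+n)), checking directly whether it lies in the searched range.
import Mathlib
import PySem

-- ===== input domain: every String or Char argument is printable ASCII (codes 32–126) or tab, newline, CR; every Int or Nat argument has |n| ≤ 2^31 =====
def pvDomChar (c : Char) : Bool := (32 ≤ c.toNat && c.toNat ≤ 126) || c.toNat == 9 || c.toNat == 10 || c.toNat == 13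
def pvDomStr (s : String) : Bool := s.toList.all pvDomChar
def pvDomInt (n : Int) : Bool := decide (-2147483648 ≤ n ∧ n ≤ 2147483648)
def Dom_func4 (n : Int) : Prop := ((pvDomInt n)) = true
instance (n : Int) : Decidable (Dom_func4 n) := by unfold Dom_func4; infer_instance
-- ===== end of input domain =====

-- B computes the unique block start by the closed-form root of the quadratic instead of A's linear search with nested square-sum loops.

-- ===== PORT A =====
-- the for-i loop with its early return; each iteration recomputes sum1/sum2 by inner folds
def func4Loop (n : Int) : List Int → Option (List Int)
  | [] => none
  | i :: rest =>
    let sum1 := (PySem.List.pyRange i (i + n + 1) 1).foldl (fun s j => s + j ^ 2) 0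
    let sum2 := (PySem.List.pyRange (i + n + 1) (i + 2 * n + 1) 1).foldl (fun s k => s + k ^ 2) 0
    if sum1 = sum2 then some (PySem.List.pyRange i (i + 2 * n + 1) 1)
    else func4Loop n rest

def func4 (n : Int) : Option (List Int) :=
  if ¬ (n ∈ PySem.List.pyRange 1 1001 1) then none
  else func4Loop n (PySem.List.pyRange 1 1000 1)

-- ===== PORT B =====
def func4_alt (n : Int) : Option (List Int) :=
  if ¬ (1 ≤ n ∧ n ≤ 1000) then none
  else
    let i := 2 * n * n + n
    if 999 < i then none
    else some (PySem.List.pyRange i (i + 2 * n + 1) 1)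

-- ===== PRECONDITION & SPEC =====
def Spec_func4 (n : Int) (out : Option (List Int)) : Prop := out = func4_alt n
instance (n : Int) (out : Option (List Int)) : Decidable (Spec_func4 n out) := by unfold Spec_func4; infer_instance

-- ===== CLAIM (what is proved, stated in full; the proofs are below) =====
def Claim_equal_func4 : Prop := ∀ (n : Int), Dom_func4 n → Spec_func4 n (func4 n)

-- ===== LEMMAS AND PROOFS =====

-- sum of squares of a, a+1, …, a+m-1
def sqS (a : Int) : Nat → Int
  | 0 => 0
  | m + 1 => sqS a m + (a + m) ^ 2

lemma fold_sq (m : Nat) (a : Int) :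
    (PySem.List.pyRange a (a + m) 1).foldl (fun s j => s + j ^ 2) 0 = sqS a m := by
  induction m with
  | zero => simp [PySem.List.pyRange_one_eq_nil, sqS]
  | succ m ih =>
    have h : a + (↑(m + 1) : Int) = (a + m) + 1 := by push_cast; ring
    rw [h, PySem.List.pyRange_one_succ_right (by omega)]
    simp [List.foldl_append, ih, sqS]

lemma fold_sq' (a b : Int) (h : a ≤ b) :
    (PySem.List.pyRange a b 1).foldl (fun s j => s + j ^ 2) 0 = sqS a (b - a).toNat := by
  have hb : b = a + ((b - a).toNat : Int) := by omega
  rw [hb, fold_sq]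
  congr 1
  omega

lemma sqS_closed (m : Nat) (a : Int) :
    6 * sqS a m = 6 * m * a ^ 2 + 6 * a * m * (m - 1) + (m - 1) * m * (2 * m - 1) := by
  induction m with
  | zero => simp [sqS]
  | succ m ih =>
    rw [sqS, mul_add, ih]
    push_cast
    ring

lemma cond_iff (n i : Int) (hn : 1 ≤ n) (hi : 1 ≤ i) :
    ((PySem.List.pyRange i (i + n + 1) 1).foldl (fun s j => s + j ^ 2) 0 =
      (PySem.List.pyRange (i + n + 1) (i + 2 * n + 1) 1).foldl (fun s k => s + k ^ 2) 0) ↔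
      i = 2 * n * n + n := by
  rw [fold_sq' _ _ (by omega), fold_sq' _ _ (by omega)]
  have e1 : (i + n + 1 - i).toNat = (n + 1).toNat := by omega
  have e2 : (i + 2 * n + 1 - (i + n + 1)).toNat = n.toNat := by omega
  rw [e1, e2]
  have H1 := sqS_closed (n + 1).toNat i
  have H2 := sqS_closed n.toNat (i + n + 1)
  have c1 : ((n + 1).toNat : Int) = n + 1 := by omega
  have c2 : ((n.toNat : Int)) = n := by omega
  rw [c1] at H1
  rw [c2] at H2
  have key : 6 * sqS i (n + 1).toNat - 6 * sqS (i + n + 1) n.toNat =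
      6 * ((i + n) * (i - (2 * n * n + n))) := by
    rw [H1, H2]; ring
  constructor
  · intro h
    rw [h] at key
    have hz : (i + n) * (i - (2 * n * n + n)) = 0 := by linarith
    rcases mul_eq_zero.mp hz with h' | h'
    · omega
    · linarith
  · intro h
    subst h
    have : (2 * n * n + n + n) * (2 * n * n + n - (2 * n * n + n)) = 0 := by ring
    rw [this] at key
    linarith

lemma loop_char (n i0 : Int)
    (hc : ∀ i : Int, 1 ≤ i →
      (((PySem.List.pyRange i (i + n + 1) 1).foldl (fun s j => s + j ^ 2) 0 =
        (PySem.List.pyRange (i + n + 1) (i + 2 * n + 1) 1).foldl (fun s k => s + k ^ 2) 0) ↔ i = i0)) :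
    ∀ l : List Int, (∀ i ∈ l, 1 ≤ i) →
      func4Loop n l = if i0 ∈ l then some (PySem.List.pyRange i0 (i0 + 2 * n + 1) 1) else none := by
  intro l
  induction l with
  | nil => intro _; simp [func4Loop]
  | cons i rest ih =>
    intro hall
    have hi : 1 ≤ i := hall i (List.mem_cons_self)
    by_cases h : i = i0
    · subst h
      simp only [func4Loop]
      rw [if_pos ((hc i hi).mpr rfl)]
      simp
    · simp only [func4Loop]
      rw [if_neg (fun hh => h ((hc i hi).mp hh))]
      rw [ih (fun x hx => hall x (List.mem_cons_of_mem _ hx))]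
      by_cases hm : i0 ∈ rest
      · rw [if_pos hm, if_pos (List.mem_cons_of_mem _ hm)]
      · rw [if_neg hm, if_neg (by
          simp only [List.mem_cons]
          rintro (hh | hh)
          · exact h hh.symm
          · exact hm hh)]

-- ===== VERDICT (by name: the statement is the Claim_ definition above) =====
theorem func4_spec : Claim_equal_func4 := by
  intro n _
  unfold Spec_func4 func4 func4_alt
  by_cases hmem : n ∈ PySem.List.pyRange 1 1001 1
  · have hn : 1 ≤ n ∧ n < 1001 := by
      rwa [PySem.List.mem_pyRange_one] at hmem
    rw [if_neg (by simp [hmem]), if_neg (by omega)]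
    rw [loop_char n (2 * n * n + n) (fun i hi => cond_iff n i hn.1 hi)
        (PySem.List.pyRange 1 1000 1)
        (fun i hi => ((PySem.List.mem_pyRange_one).mp hi).1)]
    have h1 : 1 ≤ 2 * n * n + n := by nlinarith [hn.1]
    show _ = if (999 : Int) < 2 * n * n + n then none
      else some (PySem.List.pyRange (2 * n * n + n) (2 * n * n + n + 2 * n + 1) 1)
    by_cases hb : 2 * n * n + n < 1000
    · rw [if_pos (PySem.List.mem_pyRange_one.mpr ⟨h1, hb⟩), if_neg (by omega)]
    · rw [if_neg (fun hm => hb (PySem.List.mem_pyRange_one.mp hm).2), if_pos (by omega)]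
  · rw [if_pos (by simp [hmem])]
    have : ¬ (1 ≤ n ∧ n ≤ 1000) := by
      rw [PySem.List.mem_pyRange_one] at hmem
      omega
    rw [if_pos this]
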